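-- pv_equiv track=rewrite | github.com/marco0711/Marker-REST_API_Fuzzer | generator/selection.py | match_path_with_placeholders
-- ===== SOURCE A (Python) =====
-- def match_path_with_placeholders(template_path, actual_path):
--     """
--     Matches /api/owners/{ownerId} with /api/owners/5
--     """
--     template_parts = template_path.strip("/").split("/")
--     actual_parts = actual_path.strip("/").split("/")
--
--     if len(template_parts) != len(actual_parts):
--         return False
--
--     for tp, ap in zip(template_parts, actual_parts):
--         if tp.startswith("{") and tp.endswith("}"):
--             continue  # Placeholder matches anything
--         if tp != ap:
--             return False
--     return True
-- ===== SOURCE B (Python) =====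
-- def match_path_with_placeholders(template_path, actual_path):
--     """Recursive segment-by-segment matcher: no explicit length check or zip;
--     length equality falls out of the recursion's base cases."""
--     def go(ts, aps):
--         if not ts and not aps:
--             return True
--         if not ts or not aps:
--             return False
--         t, a = ts[0], aps[0]
--         return ((t.startswith("{") and t.endswith("}")) or t == a) and go(ts[1:], aps[1:])
--     return go(template_path.strip("/").split("/"), actual_path.strip("/").split("/"))
-- ===== Notes on version B (the rewrite author's own statement) =====
-- stated objective: alternative
-- what changed: Replaces the explicit length check plus a for-loop over zip (with continue/early-return) by a single structural recursion over both segment lists whose base cases enforce equal length.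
import Mathlib
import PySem

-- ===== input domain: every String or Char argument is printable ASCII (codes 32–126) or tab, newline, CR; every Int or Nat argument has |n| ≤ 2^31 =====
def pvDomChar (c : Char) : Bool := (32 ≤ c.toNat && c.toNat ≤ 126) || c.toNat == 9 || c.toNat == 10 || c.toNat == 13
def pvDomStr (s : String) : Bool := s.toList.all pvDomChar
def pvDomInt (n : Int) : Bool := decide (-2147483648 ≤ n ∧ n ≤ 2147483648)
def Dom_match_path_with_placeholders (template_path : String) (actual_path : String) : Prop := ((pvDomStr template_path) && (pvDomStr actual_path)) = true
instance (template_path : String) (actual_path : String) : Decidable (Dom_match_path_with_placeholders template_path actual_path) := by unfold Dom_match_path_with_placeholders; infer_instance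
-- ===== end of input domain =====

-- B replaces A's explicit length check + for-loop over zip by one structural
-- recursion over both segment lists (objective: alternative decomposition).

-- ===== PORT A =====
-- the for-loop over zip(template_parts, actual_parts) with continue / early return
def pvLoopA : List (String × String) → Bool
  | [] => true
  | (tp, ap) :: rest =>
    if PySem.Str.startswith tp "{" && PySem.Str.endswith tp "}" then pvLoopA rest
    else if tp != ap then false
    else pvLoopA rest

def match_path_with_placeholders (template_path : String) (actual_path : String) : Bool :=
  let template_parts := (PySem.Str.split? (PySem.Str.stripChars template_path "/") "/").getD []
  let actual_parts := (PySem.Str.split? (PySem.Str.stripChars actual_path "/") "/").getD []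
  if template_parts.length ≠ actual_parts.length then false
  else pvLoopA (template_parts.zip actual_parts)

-- ===== PORT B =====
-- recursive two-list matcher: base cases enforce equal length
def pvGoB : List String → List String → Bool
  | [], [] => true
  | [], _ :: _ => false
  | _ :: _, [] => false
  | t :: ts, a :: aps =>
    ((PySem.Str.startswith t "{" && PySem.Str.endswith t "}") || t == a) && pvGoB ts aps

def match_path_with_placeholders_alt (template_path : String) (actual_path : String) : Bool :=
  pvGoB ((PySem.Str.split? (PySem.Str.stripChars template_path "/") "/").getD [])
        ((PySem.Str.split? (PySem.Str.stripChars actual_path "/") "/").getD [])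

-- ===== PRECONDITION & SPEC =====
def Spec_match_path_with_placeholders (template_path : String) (actual_path : String) (out : Bool) : Prop := out = match_path_with_placeholders_alt template_path actual_path
instance (template_path : String) (actual_path : String) (out : Bool) : Decidable (Spec_match_path_with_placeholders template_path actual_path out) := by unfold Spec_match_path_with_placeholders; infer_instance

-- ===== CLAIM (what is proved, stated in full; the proofs are below) =====
def Claim_equal_match_path_with_placeholders : Prop := ∀ (template_path : String) (actual_path : String), Dom_match_path_with_placeholders template_path actual_path → Spec_match_path_with_placeholders template_path actual_path (match_path_with_placeholders template_path actual_path)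

-- ===== LEMMAS AND PROOFS =====
theorem pvGoB_eq (ts : List String) : ∀ (aps : List String),
    pvGoB ts aps = if ts.length = aps.length then pvLoopA (ts.zip aps) else false := by
  induction ts with
  | nil => intro aps; cases aps <;> simp [pvGoB, pvLoopA]
  | cons t ts ih =>
    intro aps
    cases aps with
    | nil => simp [pvGoB]
    | cons a aps =>
      simp only [pvGoB, pvLoopA, List.zip_cons_cons, List.length_cons, ih]
      by_cases hs : PySem.Chars.startswith t.toList ['{'] = true <;>
        by_cases he : PySem.Chars.endswith t.toList ['}'] = true <;>
          by_cases ha : t = a <;>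
            simp [hs, he, ha, Bool.and_comm]

-- ===== VERDICT (by name: the statement is the Claim_ definition above) =====
theorem match_path_with_placeholders_spec : Claim_equal_match_path_with_placeholders := by
  intro template_path actual_path _
  unfold Spec_match_path_with_placeholders match_path_with_placeholders match_path_with_placeholders_alt
  rw [pvGoB_eq]
  split_ifs with h <;> simp_all
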